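-- pv_equiv track=rewrite | github.com/daeunni/StreamGaze | pipeline/filtering/present_ident.py | has_similar_objects
-- ===== SOURCE A (Python) =====
-- SIMILAR_PAIRS = [
--     ('counter', 'countertop'),
--     ('tomato', 'tomatoes'),
--     ('onion', 'onions'),
--     ('pepper', 'peppers'),
--     ('knife', 'knives'),
--     ('plate', 'plates'),
--     ('bowl', 'bowls'),
--     ('spoon', 'spoons'),
--     ('fork', 'forks'),
--     ('cup', 'cups'),
-- ]
--
-- def extract_object_name(option_str):
--     """Extract object name from option string like 'A. spoon' -> 'spoon'"""
--     if '. ' in option_str: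
--         return option_str.split('. ', 1)[1]
--     return option_str
--
-- def has_similar_objects(options):
--     """Check if options contain similar objects"""
--     objects = [extract_object_name(opt).lower() for opt in options]
--     similar_found = []
--
--     for pair in SIMILAR_PAIRS:
--         indices = []
--         for i, obj in enumerate(objects):
--             if obj == pair[0] or obj == pair[1]:
--                 indices.append((i, obj))
--
--         # If both members of the pair are found
--         if len(indices) >= 2:
--             pair_objs = [obj for _, obj in indices]
--             if pair[0] in pair_objs and pair[1] in pair_objs:
--                 similar_found.append((pair, indices))
--
--     return similar_found
-- ===== SOURCE B (Python) =====
-- from collections import defaultdict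
--
-- SIMILAR_PAIRS = [
--     ('counter', 'countertop'),
--     ('tomato', 'tomatoes'),
--     ('onion', 'onions'),
--     ('pepper', 'peppers'),
--     ('knife', 'knives'),
--     ('plate', 'plates'),
--     ('bowl', 'bowls'),
--     ('spoon', 'spoons'),
--     ('fork', 'forks'),
--     ('cup', 'cups'),
-- ]
--
-- def extract_object_name(option_str):
--     """Extract object name from option string like 'A. spoon' -> 'spoon'"""
--     if '. ' in option_str:
--         return option_str.split('. ', 1)[1]
--     return option_str
--
-- def has_similar_objects(options):
--     """Check if options contain similar objects (index-map version)"""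
--     index_map = defaultdict(list)
--     for i, opt in enumerate(options):
--         name = extract_object_name(opt).lower()
--         index_map[name].append((i, name))
--
--     similar_found = []
--     for a, b in SIMILAR_PAIRS:
--         if a in index_map and b in index_map:
--             indices = sorted(index_map[a] + index_map[b], key=lambda t: t[0])
--             similar_found.append(((a, b), indices))
--     return similar_found
-- ===== Notes on version B (the rewrite author's own statement) =====
-- stated objective: faster
-- what changed: B builds a name-to-indices map in one pass over the options and answers each SIMILAR_PAIR by two dictionary lookups plus a merge-by-sort, instead of A's full rescan of the option list for every pair.
import Mathlib
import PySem

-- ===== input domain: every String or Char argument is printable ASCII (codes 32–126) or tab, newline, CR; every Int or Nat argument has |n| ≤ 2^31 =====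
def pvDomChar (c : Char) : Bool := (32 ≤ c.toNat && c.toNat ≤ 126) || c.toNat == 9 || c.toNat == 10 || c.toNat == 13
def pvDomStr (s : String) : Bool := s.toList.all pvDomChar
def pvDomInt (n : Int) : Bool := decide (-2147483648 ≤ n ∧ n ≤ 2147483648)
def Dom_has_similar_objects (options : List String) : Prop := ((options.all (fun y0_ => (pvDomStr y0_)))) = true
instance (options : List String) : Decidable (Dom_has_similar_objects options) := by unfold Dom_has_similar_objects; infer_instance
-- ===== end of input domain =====

-- B replaces A's per-pair rescan of the option list by one index-map build plus per-pair lookups; objective: faster (constant mechanism, fewer passes).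

-- ===== PORT A =====
def SIMILAR_PAIRS : List (String × String) :=
  [("counter", "countertop"), ("tomato", "tomatoes"), ("onion", "onions"),
   ("pepper", "peppers"), ("knife", "knives"), ("plate", "plates"),
   ("bowl", "bowls"), ("spoon", "spoons"), ("fork", "forks"), ("cup", "cups")]

-- shared module helper: option_str.split('. ', 1)[1] — when '. ' ∈ s the split has a
-- second piece, so List.getD 1 is exact (the default is never used).
def extract_object_name (s : String) : String :=
  if PySem.Str.isIn ". " s then ((PySem.Str.splitMax? s ". " 1).getD []).getD 1 s
  else s

def has_similar_objects (options : List String) : List ((String × String) × (List (Int × String))) :=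
  let objects := options.map (fun opt => PySem.Str.lower (extract_object_name opt))
  SIMILAR_PAIRS.foldl
    (fun acc pr =>
      let indices := (PySem.List.enumerate objects 0).foldl
        (fun ind p => if p.2 == pr.1 || p.2 == pr.2 then ind ++ [p] else ind) []
      if 2 ≤ indices.length then
        let pair_objs := indices.map (fun t => t.2)
        if pair_objs.contains pr.1 && pair_objs.contains pr.2 then acc ++ [(pr, indices)]
        else acc
      else acc)
    []

-- ===== PORT B =====
def has_similar_objects_alt (options : List String) : List ((String × String) × (List (Int × String))) :=
  let index_map := (PySem.List.enumerate options 0).foldl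
    (fun d p =>
      let name := PySem.Str.lower (extract_object_name p.2)
      d.modify name [] (fun l => l ++ [(p.1, name)]))
    PySem.Dict.empty
  SIMILAR_PAIRS.foldl
    (fun acc pr =>
      if index_map.contains pr.1 && index_map.contains pr.2 then
        acc ++ [(pr, PySem.List.sorted (index_map.getD pr.1 [] ++ index_map.getD pr.2 []) (fun t => t.1))]
      else acc)
    []

-- ===== PRECONDITION & SPEC =====
def Spec_has_similar_objects (options : List String) (out : List ((String × String) × (List (Int × String)))) : Prop := out = has_similar_objects_alt options
instance (options : List String) (out : List ((String × String) × (List (Int × String)))) : Decidable (Spec_has_similar_objects options out) := by unfold Spec_has_similar_objects; infer_instance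

-- ===== CLAIM (what is proved, stated in full; the proofs are below) =====
def Claim_equal_has_similar_objects : Prop := ∀ (options : List String), Dom_has_similar_objects options → Spec_has_similar_objects options (has_similar_objects options)

-- ===== LEMMAS AND PROOFS =====

lemma pv_enumerate_map (xs : List String) (s : Int) (f : String → String) :
    PySem.List.enumerate (xs.map f) s = (PySem.List.enumerate xs s).map (fun p => (p.1, f p.2)) := by
  induction xs generalizing s with
  | nil => simp [PySem.List.enumerate_nil]
  | cons x t ih => simp [PySem.List.enumerate_cons, ih]

lemma pv_two_le_length {α : Type} {p q : α} {l : List α} (h1 : p ∈ l) (h2 : q ∈ l)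
    (hne : p ≠ q) : 2 ≤ l.length := by
  rcases l with _ | ⟨x, t⟩
  · simp at h1
  · rcases ht : t with _ | _
    · subst ht; simp_all
    · simp

lemma pv_filter_or_perm {α : Type} (p q : α → Bool) (l : List α)
    (hdisj : ∀ x ∈ l, ¬(p x = true ∧ q x = true)) :
    (l.filter (fun x => p x || q x)).Perm (l.filter p ++ l.filter q) := by
  induction l with
  | nil => simp
  | cons x t ih =>
    have hd := hdisj x (by simp)
    have iht := ih (fun y hy => hdisj y (by simp [hy]))
    by_cases hp : p x = true
    · have hq : q x = false := by
        cases hqx : q x with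
        | false => rfl
        | true => exact absurd ⟨hp, hqx⟩ hd
      simpa [List.filter_cons, hp, hq] using iht.cons x
    · simp only [Bool.not_eq_true] at hp
      by_cases hq : q x = true
      · simp only [List.filter_cons, hp, hq, Bool.false_or]
        exact (iht.cons x).trans List.perm_middle.symm
      · simp only [Bool.not_eq_true] at hq
        simpa [List.filter_cons, hp, hq] using iht

-- Pairwise-increasing first components of enumerate
lemma pv_enumerate_pairwise (xs : List String) :
    (PySem.List.enumerate xs 0).Pairwise (fun a b => a.1 < b.1) := by
  have h := PySem.List.pairwise_lt_pyRange_one 0 (0 + (xs.length : Int))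
  rw [← PySem.List.map_fst_enumerate xs 0] at h
  exact (List.pairwise_map.mp h)

-- the per-pair step of A equals the per-pair step of B (for a pair with distinct members)
lemma pv_step_eq (options : List String) (a b : String) (hab : a ≠ b)
    (acc : List ((String × String) × (List (Int × String)))) :
    (let objects := options.map (fun opt => PySem.Str.lower (extract_object_name opt))
     let indices := (PySem.List.enumerate objects 0).foldl
        (fun ind p => if p.2 == a || p.2 == b then ind ++ [p] else ind) []
     if 2 ≤ indices.length then
        let pair_objs := indices.map (fun t => t.2)
        if pair_objs.contains a && pair_objs.contains b then acc ++ [((a, b), indices)]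
        else acc
     else acc) =
    (let index_map := (PySem.List.enumerate options 0).foldl
        (fun d p =>
          let name := PySem.Str.lower (extract_object_name p.2)
          d.modify name [] (fun l => l ++ [(p.1, name)]))
        PySem.Dict.empty
     if index_map.contains a && index_map.contains b then
        acc ++ [((a, b), PySem.List.sorted (index_map.getD a [] ++ index_map.getD b []) (fun t => t.1))]
     else acc) := by
  dsimp only
  set objects := options.map (fun opt => PySem.Str.lower (extract_object_name opt)) with hobjDef
  set indices := (PySem.List.enumerate objects 0).foldl
      (fun ind p => if p.2 == a || p.2 == b then ind ++ [p] else ind) [] with hindDef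
  set index_map := (PySem.List.enumerate options 0).foldl
      (fun d p =>
        let name := PySem.Str.lower (extract_object_name p.2)
        d.modify name [] (fun l => l ++ [(p.1, name)])) PySem.Dict.empty with himDef
  -- rewrite B's dict fold as a fold over key/value pairs drawn from E := enumerate objects 0
  have hE : (PySem.List.enumerate options 0).map
        (fun p => ((PySem.Str.lower (extract_object_name p.2)),
                   (p.1, PySem.Str.lower (extract_object_name p.2))))
      = (PySem.List.enumerate objects 0).map (fun q => (q.2, q)) := by
    rw [hobjDef, pv_enumerate_map]
    simp [List.map_map, Function.comp]
  have hmap : index_map = ((PySem.List.enumerate objects 0).map (fun q => (q.2, q))).foldl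
      (fun d p => d.modify p.1 [] (fun l => l ++ [p.2])) PySem.Dict.empty := by
    rw [himDef, ← hE, List.foldl_map]
  -- characterise B's lookups
  have hgetD : ∀ c : String, index_map.getD c [] =
      (PySem.List.enumerate objects 0).filter (fun q => q.2 == c) := by
    intro c
    rw [hmap, PySem.Dict.getD_foldl_modify_append]
    rw [List.filter_map]
    simp [Function.comp_def]
  have hcontains : ∀ c : String, index_map.contains c = true ↔ c ∈ objects := by
    intro c
    have hkeys : (List.foldl (fun d (p : String × (Int × String)) => d.modify p.1 [] fun l => l ++ [p.2])
        PySem.Dict.empty ((PySem.List.enumerate objects 0).map (fun q => (q.2, q)))).keys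
        = PySem.Set.update (PySem.Dict.empty (ν := List (Int × String))).keys
            (((PySem.List.enumerate objects 0).map (fun q => (q.2, q))).map (fun p => p.1)) :=
      PySem.Dict.keys_foldl_modify_key _ (fun p => p.1) [] (fun _ (p : String × (Int × String)) l => l ++ [p.2]) PySem.Dict.empty
    rw [PySem.Dict.contains_iff_mem_keys, hmap, hkeys]
    rw [PySem.Set.mem_update]
    simp only [PySem.Dict.keys_empty, List.not_mem_nil, false_or, List.map_map]
    constructor
    · rintro h
      simp only [List.mem_map, Function.comp] at h
      obtain ⟨q, hq, rfl⟩ := h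
      have : q.2 ∈ objects := by
        rw [← PySem.List.map_snd_enumerate objects 0]
        exact List.mem_map_of_mem hq
      exact this
    · intro h
      rw [← PySem.List.map_snd_enumerate objects 0] at h
      obtain ⟨q, hq, rfl⟩ := List.mem_map.mp h
      exact List.mem_map.mpr ⟨q, hq, rfl⟩
  -- characterise A's indices
  have hind : indices = (PySem.List.enumerate objects 0).filter (fun p => p.2 == a || p.2 == b) := by
    rw [hindDef]
    have := PySem.List.foldl_append_if (fun p : Int × String => p.2 == a || p.2 == b)
      (fun p => p) (PySem.List.enumerate objects 0) []
    simpa using this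
  -- membership in pair_objs
  have hpo : ∀ c : String, (c = a ∨ c = b) →
      (c ∈ indices.map (fun t => t.2) ↔ c ∈ objects) := by
    intro c hc
    rw [hind]
    constructor
    · intro h
      obtain ⟨q, hq, rfl⟩ := List.mem_map.mp h
      rw [← PySem.List.map_snd_enumerate objects 0]
      exact List.mem_map_of_mem (List.mem_of_mem_filter hq)
    · intro h
      rw [← PySem.List.map_snd_enumerate objects 0] at h
      obtain ⟨q, hq, rfl⟩ := List.mem_map.mp h
      refine List.mem_map.mpr ⟨q, List.mem_filter.mpr ⟨hq, ?_⟩, rfl⟩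
      rcases hc with h' | h' <;> simp [h']
    -- the two guards are equivalent
  by_cases ha : a ∈ objects
  · by_cases hb : b ∈ objects
    · -- both branches append, with equal payloads
      have hca : index_map.contains a = true := (hcontains a).mpr ha
      have hcb : index_map.contains b = true := (hcontains b).mpr hb
      -- two distinct members of indices
      obtain ⟨pa, hpaE, hpa2⟩ : ∃ p ∈ PySem.List.enumerate objects 0, p.2 = a := by
        rw [← PySem.List.map_snd_enumerate objects 0] at ha
        obtain ⟨q, hq, h2⟩ := List.mem_map.mp ha
        exact ⟨q, hq, h2⟩
      obtain ⟨pb, hpbE, hpb2⟩ : ∃ p ∈ PySem.List.enumerate objects 0, p.2 = b := by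
        rw [← PySem.List.map_snd_enumerate objects 0] at hb
        obtain ⟨q, hq, h2⟩ := List.mem_map.mp hb
        exact ⟨q, hq, h2⟩
      have hpaI : pa ∈ indices := by
        rw [hind]; exact List.mem_filter.mpr ⟨hpaE, by simp [hpa2]⟩
      have hpbI : pb ∈ indices := by
        rw [hind]; exact List.mem_filter.mpr ⟨hpbE, by simp [hpb2]⟩
      have hlen : 2 ≤ indices.length :=
        pv_two_le_length hpaI hpbI (by intro h; exact hab (by rw [← hpa2, ← hpb2, h]))
      have hma : (indices.map (fun t => t.2)).contains a = true := by
        simp only [List.contains_iff_mem]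
        exact (hpo a (Or.inl rfl)).mpr ha
      have hmb : (indices.map (fun t => t.2)).contains b = true := by
        simp only [List.contains_iff_mem]
        exact (hpo b (Or.inr rfl)).mpr hb
      rw [if_pos hlen]
      simp only [hma, hmb, hca, hcb, Bool.and_self]
      -- payload equality: sorted (getD a ++ getD b) by fst = indices
      have hsort : PySem.List.sorted
          ((PySem.List.enumerate objects 0).filter (fun q => q.2 == a) ++
           (PySem.List.enumerate objects 0).filter (fun q => q.2 == b)) (fun t => t.1)
          = (PySem.List.enumerate objects 0).filter (fun p => p.2 == a || p.2 == b) := by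
        apply PySem.List.sorted_eq_of_perm_of_pairwise_lt
        · exact pv_filter_or_perm (fun p : Int × String => p.2 == a) (fun p => p.2 == b) _
            (by intro x _ h; exact hab (by
                  have h1 := h.1; have h2 := h.2
                  simp only [beq_iff_eq] at h1 h2; rw [← h1, ← h2]))
        · exact (pv_enumerate_pairwise objects).filter _
      rw [hgetD a, hgetD b, hsort, hind]
    · -- b absent: neither appends
      have hcb : index_map.contains b = false := by
        cases h : index_map.contains b with
        | false => rfl
        | true => exact absurd ((hcontains b).mp h) hb
      have hmb : (indices.map (fun t => t.2)).contains b = false := by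
        cases h : (indices.map (fun t => t.2)).contains b with
        | false => rfl
        | true =>
          exact absurd ((hpo b (Or.inr rfl)).mp (List.contains_iff_mem.mp h)) hb
      simp only [hmb, hcb, Bool.and_false]
      simp
  · -- a absent: neither appends
    have hca : index_map.contains a = false := by
      cases h : index_map.contains a with
      | false => rfl
      | true => exact absurd ((hcontains a).mp h) ha
    have hma : (indices.map (fun t => t.2)).contains a = false := by
      cases h : (indices.map (fun t => t.2)).contains a with
      | false => rfl
      | true =>
        exact absurd ((hpo a (Or.inl rfl)).mp (List.contains_iff_mem.mp h)) ha
    simp only [hma, hca, Bool.false_and]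
    simp

-- ===== VERDICT (by name: the statement is the Claim_ definition above) =====
theorem has_similar_objects_spec : Claim_equal_has_similar_objects := by
  intro options _
  show has_similar_objects options = has_similar_objects_alt options
  unfold has_similar_objects has_similar_objects_alt
  apply PySem.List.foldl_congr_mem
  intro acc pr hpr
  have hab : pr.1 ≠ pr.2 := by
    fin_cases hpr <;> decide
  exact pv_step_eq options pr.1 pr.2 hab acc
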